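-- pv_equiv track=rewrite | github.com/cdstanford/dz3-artifact | experiments/run_all.py | table_tostr
-- ===== SOURCE A (Python) =====
-- def table_tostr(fstcol_width, rows, headers):
--     """
--     Pretty print a table.
--
--     First col width given, others deduced from headers.
--     """
--     fstcol_fmt = '{:>' + str(fstcol_width) + '}'
--     othercol_fmts = ["{:>" + str(len(hdr) + 1) + "}" for hdr in headers[1:]]
--     row_fmt = fstcol_fmt + "".join(othercol_fmts) + "\n"
--     result = row_fmt.format(*headers)
--     for row in rows:
--         result += row_fmt.format(*row)
--     return result
-- ===== SOURCE B (Python) =====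
-- def table_tostr(fstcol_width, rows, headers):
--     """
--     Pretty print a table.
--
--     First col width given, others deduced from headers.
--     """
--     table = [headers] + rows
--     widths = [fstcol_width] + [len(h) + 1 for h in headers[1:]]
--     cols = [[r[j].rjust(w) for r in table] for j, w in enumerate(widths)]
--     return ''.join(''.join(line) + '\n' for line in zip(*cols))
-- ===== Notes on version B (the rewrite author's own statement) =====
-- stated objective: alternative
-- what changed: A builds one combined format string and renders the table row by row with str.format; B pads the table column by column (one padded list per column) and transposes the padded columns back into lines with zip(*cols).
-- crash fix: On a negative fstcol_width (with nonempty headers and rows at least as long as headers) A raises ValueError ('Sign not allowed in string format specifier') while B's rjust pads nothing and returns the unpadded table. — e.g. on table_tostr(-2, [["a", "b"]], ["h", "i"]): A raises ValueError, B returns "h i\na b\n"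
import Mathlib
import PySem

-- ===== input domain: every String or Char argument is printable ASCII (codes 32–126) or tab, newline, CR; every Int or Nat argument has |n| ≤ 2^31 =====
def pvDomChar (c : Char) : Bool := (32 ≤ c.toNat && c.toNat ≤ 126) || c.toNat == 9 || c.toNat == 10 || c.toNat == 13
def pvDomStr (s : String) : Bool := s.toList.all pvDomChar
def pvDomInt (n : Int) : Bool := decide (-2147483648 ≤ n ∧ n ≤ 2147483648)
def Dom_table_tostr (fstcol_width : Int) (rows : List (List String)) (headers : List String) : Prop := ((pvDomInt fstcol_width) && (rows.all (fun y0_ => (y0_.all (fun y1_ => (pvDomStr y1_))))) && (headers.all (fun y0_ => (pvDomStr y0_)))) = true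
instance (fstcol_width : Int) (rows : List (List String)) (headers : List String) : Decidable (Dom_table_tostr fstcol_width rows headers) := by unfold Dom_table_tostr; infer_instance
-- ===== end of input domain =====

-- B drops A's build-a-format-string-then-.format strategy: it pads the table COLUMN BY COLUMN
-- and transposes the padded columns back into lines (zip(*cols)); objective: alternative
-- algorithm (no speed claim).

-- ===== PORT A =====
-- right-justify to width w (what the format spec '>w' does to a string argument)
def pvRJ (cs : List Char) (w : Nat) : List Char := List.replicate (w - cs.length) ' ' ++ cs

-- Hand port of str.format for the format strings A builds ('{:>' + digits + '}' pieces and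
-- literal chars): exact for those (on Pre_ the width digits are str(n) of an n ≥ 0 and every
-- '{' in the format string opens a '{:>w}' spec).  pvFmtScan copies literal chars and enters a
-- spec at '{:>'; pvFmtWidth accumulates the decimal width until '}', then pads the next
-- positional argument.  Running out of arguments is Python's IndexError (excluded by Pre_).
mutual
def pvFmtScan : List Char → List String → List Char
  | [], _ => []
  | '{' :: ':' :: '>' :: rest, args => pvFmtWidth rest 0 args
  | c :: rest, args => c :: pvFmtScan rest args
def pvFmtWidth : List Char → Nat → List String → List Char
  | [], _, _ => []
  | '}' :: rest, w, args =>
      match args with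
      | [] => []                                   -- IndexError in Python: outside Pre_
      | a :: args' => pvRJ a.toList w ++ pvFmtScan rest args'
  | c :: rest, w, args => pvFmtWidth rest (w * 10 + (c.toNat - 48)) args
end

def table_tostr (fstcol_width : Int) (rows : List (List String)) (headers : List String) : String :=
  let fstcol_fmt : List Char := ['{', ':', '>'] ++ PySem.Int.toChars fstcol_width ++ ['}']
  let othercol_fmts : List (List Char) :=
    (PySem.List.slice headers (some 1) none).map
      (fun hdr => ['{', ':', '>'] ++ PySem.Int.toChars (PySem.Str.len hdr + 1) ++ ['}'])
  let row_fmt : List Char := fstcol_fmt ++ PySem.Chars.join [] othercol_fmts ++ ['\n']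
  let result : List Char := pvFmtScan row_fmt headers
  String.mk (rows.foldl (fun acc row => acc ++ pvFmtScan row_fmt row) result)

-- ===== PORT B =====
-- s.rjust(w) for an int w (w ≤ len(s), in particular w < 0, pads nothing)
def pvRjust (s : String) (w : Int) : List Char :=
  List.replicate (w - PySem.Str.len s).toNat ' ' ++ s.toList

-- zip(*cols): truncate to the shortest column, line by line (structural on the first column)
def pvZipAux : List (List Char) → List (List (List Char)) → List (List (List Char))
  | [], _ => []
  | x :: rest, cs =>
    if cs.any (·.isEmpty) then []
    else (x :: cs.map (fun c => c.headD [])) :: pvZipAux rest (cs.map (fun c => c.tail))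

def pvZipN : List (List (List Char)) → List (List (List Char))
  | [] => []
  | c0 :: cs => pvZipAux c0 cs

def table_tostr_alt (fstcol_width : Int) (rows : List (List String)) (headers : List String) : String :=
  let table : List (List String) := headers :: rows
  let widths : List Int :=
    fstcol_width :: (PySem.List.slice headers (some 1) none).map (fun h => PySem.Str.len h + 1)
  let cols : List (List (List Char)) :=
    (PySem.List.enumerate widths).map
      (fun jw => table.map (fun r => pvRjust (PySem.List.pyGetD r jw.1 "") jw.2))
  String.mk (PySem.Chars.join [] ((pvZipN cols).map (fun line => PySem.Chars.join [] line ++ ['\n'])))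

-- ===== PRECONDITION & SPEC =====
-- Pre_ excludes exactly the inputs where Python A raises: a negative fstcol_width (ValueError:
-- sign in the format spec), empty headers and rows shorter than headers (IndexError).
def Pre_table_tostr (fstcol_width : Int) (rows : List (List String)) (headers : List String) : Prop :=
  0 ≤ fstcol_width ∧ headers ≠ [] ∧ ∀ row ∈ rows, headers.length ≤ row.length
instance (fstcol_width : Int) (rows : List (List String)) (headers : List String) : Decidable (Pre_table_tostr fstcol_width rows headers) := by unfold Pre_table_tostr; infer_instance

def pvWitness_table_tostr : Int × List (List String) × List String :=
  (3, [["a", "bb"], ["ccc", "d"]], ["h1", "h2"])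

-- On a negative fstcol_width (otherwise well-formed input) A raises ValueError
-- ("Sign not allowed in string format specifier") while B's rjust simply pads nothing.
def Raises_table_tostr (fstcol_width : Int) (rows : List (List String)) (headers : List String) : Prop :=
  fstcol_width < 0 ∧ headers ≠ [] ∧ ∀ row ∈ rows, headers.length ≤ row.length
instance (fstcol_width : Int) (rows : List (List String)) (headers : List String) : Decidable (Raises_table_tostr fstcol_width rows headers) := by unfold Raises_table_tostr; infer_instance

def pvRaiseWitness_table_tostr : Int × List (List String) × List String :=
  (-2, [["a", "b"]], ["h", "i"])
def pvRaiseWitnessOut_table_tostr : String := "h i\na b\n"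

def Spec_table_tostr (fstcol_width : Int) (rows : List (List String)) (headers : List String) (out : String) : Prop := out = table_tostr_alt fstcol_width rows headers
instance (fstcol_width : Int) (rows : List (List String)) (headers : List String) (out : String) : Decidable (Spec_table_tostr fstcol_width rows headers out) := by unfold Spec_table_tostr; infer_instance

-- ===== CLAIM (what is proved, stated in full; the proofs are below) =====
def Claim_equal_table_tostr : Prop := ∀ (fstcol_width : Int) (rows : List (List String)) (headers : List String), Dom_table_tostr fstcol_width rows headers → Pre_table_tostr fstcol_width rows headers → Spec_table_tostr fstcol_width rows headers (table_tostr fstcol_width rows headers)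

def Claim_raises_table_tostr : Prop := (∀ (fstcol_width : Int) (rows : List (List String)) (headers : List String), Dom_table_tostr fstcol_width rows headers → Raises_table_tostr fstcol_width rows headers → ¬ Pre_table_tostr fstcol_width rows headers) ∧ (Dom_table_tostr (pvRaiseWitness_table_tostr.1) (pvRaiseWitness_table_tostr.2.1) (pvRaiseWitness_table_tostr.2.2) ∧ Raises_table_tostr (pvRaiseWitness_table_tostr.1) (pvRaiseWitness_table_tostr.2.1) (pvRaiseWitness_table_tostr.2.2) ∧ table_tostr_alt (pvRaiseWitness_table_tostr.1) (pvRaiseWitness_table_tostr.2.1) (pvRaiseWitness_table_tostr.2.2) = pvRaiseWitnessOut_table_tostr)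

-- ===== LEMMAS AND PROOFS =====

-- digit step used by pvFmtWidth
def pvStep (a : Nat) (c : Char) : Nat := a * 10 + (c.toNat - 48)

theorem pvDigitChar_ne_rbrace (m : Nat) (h : m < 10) : Nat.digitChar m ≠ '}' := by
  interval_cases m <;> decide

theorem pvStep_digitChar (a m : Nat) (h : m < 10) : pvStep a (Nat.digitChar m) = a * 10 + m := by
  interval_cases m <;> rfl

theorem pvToDigitsCore_ne_rbrace :
    ∀ (f n : Nat) (ds : List Char), (∀ c ∈ ds, c ≠ '}') →
      ∀ c ∈ Nat.toDigitsCore 10 f n ds, c ≠ '}' := by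
  intro f
  induction f with
  | zero => intro n ds h c hc; exact h c hc
  | succ f ih =>
    intro n ds h c hc
    have hds : ∀ c ∈ Nat.digitChar (n % 10) :: ds, c ≠ '}' := by
      intro c' hc'
      rcases List.mem_cons.mp hc' with h' | h'
      · exact h' ▸ pvDigitChar_ne_rbrace _ (Nat.mod_lt _ (by norm_num))
      · exact h c' h'
    simp only [Nat.toDigitsCore] at hc
    split at hc
    · exact hds c hc
    · exact ih _ _ hds c hc

theorem pvToDigitsCore_parse :
    ∀ (f n : Nat) (ds : List Char) (a : Nat), n < 10 ^ f →
      List.foldl pvStep a (Nat.toDigitsCore 10 f n ds) =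
        List.foldl pvStep (a * 10 ^ (Nat.toDigitsCore 10 f n []).length + n) ds := by
  intro f
  induction f with
  | zero =>
    intro n ds a h
    interval_cases n
    simp [Nat.toDigitsCore]
  | succ f ih =>
    intro n ds a h
    simp only [Nat.toDigitsCore]
    split
    · rename_i h0
      have hn : n < 10 := by omega
      simp only [List.foldl, List.length_singleton, pow_one]
      rw [pvStep_digitChar a (n % 10) (Nat.mod_lt _ (by norm_num)), Nat.mod_eq_of_lt hn]
    · rename_i h0
      have hdiv : n / 10 < 10 ^ f := Nat.div_lt_of_lt_mul (by rw [← pow_succ']; exact h)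
      rw [ih (n / 10) _ a hdiv]
      simp only [List.foldl]
      rw [Nat.toDigitsCore_lens_eq,
        pvStep_digitChar _ (n % 10) (Nat.mod_lt _ (by norm_num))]
      have : (a * 10 ^ (Nat.toDigitsCore 10 f (n / 10) []).length + n / 10) * 10 + n % 10
           = a * 10 ^ ((Nat.toDigitsCore 10 f (n / 10) []).length + 1) + n := by
        rw [pow_succ]
        have := Nat.div_add_mod n 10
        ring_nf
        omega
      rw [this]

theorem pvParse_toDigits (n : Nat) :
    List.foldl pvStep 0 (Nat.toDigits 10 n) = n := by
  have hlt : n < 10 ^ (n + 1) :=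
    lt_of_lt_of_le (Nat.lt_pow_self (by norm_num)) (Nat.pow_le_pow_right (by norm_num) (by omega))
  simpa using pvToDigitsCore_parse (n + 1) n [] 0 hlt

theorem pvToDigits_ne_rbrace (n : Nat) : ∀ c ∈ Nat.toDigits 10 n, c ≠ '}' :=
  pvToDigitsCore_ne_rbrace _ _ [] (by simp)

theorem pvScan_nl (args : List String) : pvFmtScan ['\n'] args = ['\n'] := rfl

theorem pvWidth_scan (cs : List Char) : ∀ (acc : Nat) (rest : List Char) (a : String) (args' : List String),
    (∀ c ∈ cs, c ≠ '}') →
    pvFmtWidth (cs ++ '}' :: rest) acc (a :: args') =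
      pvRJ a.toList (List.foldl pvStep acc cs) ++ pvFmtScan rest args' := by
  induction cs with
  | nil => intro acc rest a args' _; rfl
  | cons c cs ih =>
    intro acc rest a args' h
    rw [List.cons_append, pvFmtWidth.eq_def]
    split
    · simp_all
    · simp_all
    · rename_i cc rr hne heq
      injection heq with h1 h2
      subst h1; subst h2
      rw [ih _ rest a args' (fun c hc => h c (List.mem_cons_of_mem _ hc))]
      rfl

-- the per-header '{:>w}' pieces of A's format string, with the widths as naturals
def pvSpecOf (w : Nat) : List Char := '{' :: ':' :: '>' :: (Nat.toDigits 10 w ++ ['}'])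
def pvSpecs (ws : List Nat) : List Char := (ws.map pvSpecOf).flatten

theorem pvScan_specs : ∀ (ws : List Nat) (args : List String) (rest : List Char),
    ws.length ≤ args.length →
    pvFmtScan (pvSpecs ws ++ rest) args =
      (List.zipWith (fun w a => pvRJ a.toList w) ws args).flatten ++
        pvFmtScan rest (args.drop ws.length) := by
  intro ws
  induction ws with
  | nil => intro args rest h; simp [pvSpecs]
  | cons w ws ih =>
    intro args rest h
    cases args with
    | nil => simp at h
    | cons a args' =>
      have hrw : pvSpecs (w :: ws) ++ rest
          = '{' :: ':' :: '>' :: (Nat.toDigits 10 w ++ '}' :: (pvSpecs ws ++ rest)) := by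
        simp [pvSpecs, pvSpecOf]
      rw [hrw]
      show pvFmtWidth (Nat.toDigits 10 w ++ '}' :: (pvSpecs ws ++ rest)) 0 (a :: args') = _
      rw [pvWidth_scan _ 0 _ a args' (pvToDigits_ne_rbrace w), pvParse_toDigits w,
        ih args' rest (by simpa using h)]
      simp

theorem pvJoin_nil (xss : List (List Char)) : PySem.Chars.join [] xss = xss.flatten := by
  show ([] : List Char).intercalate xss = xss.flatten
  induction xss with
  | nil => rfl
  | cons a t ih =>
    cases t with
    | nil => rfl
    | cons b t' =>
      rw [List.intercalate] at *
      simp only [List.intersperse_cons₂, List.flatten_cons] at *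
      simp [ih]

theorem pvRjust_eq (s : String) (w : Int) : pvRjust s w = pvRJ s.toList w.toNat := by
  unfold pvRjust pvRJ
  congr 1
  congr 1
  simp only [PySem.Str.len]
  omega

-- zip(*cols) of rectangular columns built by mapping over the same list is the transpose
theorem pvZipAux_map {α β : Type} (f : α → β → List Char) :
    ∀ (xs : List β) (g0 : α) (gs' : List α),
      pvZipAux (xs.map (f g0)) (gs'.map (fun g => xs.map (f g)))
        = xs.map (fun x => f g0 x :: gs'.map (fun g => f g x)) := by
  intro xs
  induction xs with
  | nil => intro g0 gs'; rfl
  | cons x xs' ih =>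
    intro g0 gs'
    rw [List.map_cons, pvZipAux]
    rw [if_neg (by simp [List.any_eq_false])]
    have hheads : (List.map (fun g => List.map (f g) (x :: xs')) gs').map (fun c => c.headD [])
        = gs'.map (fun g => f g x) := by
      simp [List.map_map, Function.comp_def]
    have htails : (List.map (fun g => List.map (f g) (x :: xs')) gs').map (fun c => c.tail)
        = gs'.map (fun g => List.map (f g) xs') := by
      simp [List.map_map, Function.comp_def]
    rw [hheads, htails, ih g0 gs', List.map_cons]

theorem pvZipN_map {α β : Type} (f : α → β → List Char) (xs : List β) (g0 : α) (gs' : List α) :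
    pvZipN ((g0 :: gs').map (fun g => xs.map (f g))) = xs.map (fun x => (g0 :: gs').map (fun g => f g x)) := by
  rw [List.map_cons, pvZipN]
  simpa using pvZipAux_map f xs g0 gs'

-- the per-row cells of B, enumerate-indexed, as a zipWith (indices stay in range under Pre_)
theorem pvEnumCells :
    ∀ (ws : List Int) (pre r2 : List String), ws.length ≤ r2.length →
      (PySem.List.enumerate ws (pre.length : Int)).map
          (fun jw => pvRjust (PySem.List.pyGetD (pre ++ r2) jw.1 "") jw.2)
        = List.zipWith (fun w a => pvRjust a w) ws r2 := by
  intro ws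
  induction ws with
  | nil => intro pre r2 h; simp [PySem.List.enumerate_nil]
  | cons w ws ih =>
    intro pre r2 h
    cases r2 with
    | nil => simp at h
    | cons a r2' =>
      rw [PySem.List.enumerate_cons, List.map_cons, List.zipWith_cons_cons]
      have hget : PySem.List.pyGetD (pre ++ a :: r2') ((pre.length : Nat) : Int) "" = a := by
        rw [PySem.List.pyGetD_natCast]
        simp [List.getD]
      have hcast : ((pre.length : Int) + 1) = (((pre ++ [a]).length : Nat) : Int) := by
        simp
      have happ : pre ++ a :: r2' = (pre ++ [a]) ++ r2' := by simp
      congr 1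
      · simp only [hget]
      · rw [hcast, happ, ih (pre ++ [a]) r2' (by simpa using h)]

theorem pvToChars_nonneg (n : Int) (h : 0 ≤ n) :
    PySem.Int.toChars n = Nat.toDigits 10 n.toNat := by
  simp [PySem.Int.toChars, not_lt.mpr h]

theorem pvToChars_len (s : String) :
    PySem.Int.toChars ((s.length : Int) + 1) = Nat.toDigits 10 (s.length + 1) := by
  rw [show ((s.length : Int) + 1) = ((s.length + 1 : Nat) : Int) from by push_cast; ring,
    pvToChars_nonneg _ (by positivity), Int.toNat_natCast]

-- ===== VERDICT (by name: the statement is the Claim_ definition above) =====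
theorem table_tostr_spec : Claim_equal_table_tostr := by
  unfold Claim_equal_table_tostr Spec_table_tostr
  intro w rows headers _ hpre
  obtain ⟨hw, hh, hrows⟩ := hpre
  cases headers with
  | nil => exact absurd rfl hh
  | cons h0 hs =>
    unfold table_tostr table_tostr_alt
    have hslice : PySem.List.slice (h0 :: hs) (some 1) none = hs := by
      rw [PySem.List.slice_from _ (by norm_num)]; rfl
    simp only [hslice]
    have hfmt : ['{', ':', '>'] ++ PySem.Int.toChars w ++ ['}'] ++
          PySem.Chars.join []
            (List.map (fun hdr => ['{', ':', '>'] ++ PySem.Int.toChars (PySem.Str.len hdr + 1) ++ ['}']) hs) ++ ['\n']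
        = pvSpecs (w.toNat :: hs.map (fun h => h.length + 1)) ++ ['\n'] := by
      rw [pvJoin_nil, pvToChars_nonneg w hw]
      simp [pvSpecs, pvSpecOf, pvToChars_len, List.append_assoc, Function.comp_def]
    rw [hfmt]
    set ws := w.toNat :: hs.map (fun h => h.length + 1) with hws_def
    set widths := w :: hs.map (fun h => PySem.Str.len h + 1) with hwidths_def
    have hwlen : ws.length = (h0 :: hs).length := by simp [hws_def]
    have hwidlen : widths.length = (h0 :: hs).length := by simp [hwidths_def]
    have hmap : widths.map Int.toNat = ws := by
      simp [hwidths_def, hws_def, List.map_map, Function.comp_def, PySem.Str.len]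
    have hrowA : ∀ r : List String, (h0 :: hs).length ≤ r.length →
        pvFmtScan (pvSpecs ws ++ ['\n']) r
          = (List.zipWith (fun wd a => pvRJ a.toList wd.toNat) widths r).flatten ++ ['\n'] := by
      intro r hr
      rw [pvScan_specs ws r ['\n'] (hwlen ▸ hr), pvScan_nl, ← hmap, List.zipWith_map_left]
    -- B side: transpose the columns, then identify each line with A's row rendering
    have hzip : pvZipN ((PySem.List.enumerate widths).map
          (fun jw => ((h0 :: hs) :: rows).map (fun r => pvRjust (PySem.List.pyGetD r jw.1 "") jw.2)))
        = ((h0 :: hs) :: rows).map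
            (fun r => (PySem.List.enumerate widths).map (fun jw => pvRjust (PySem.List.pyGetD r jw.1 "") jw.2)) := by
      have henum : PySem.List.enumerate widths
          = (0, w) :: PySem.List.enumerate (hs.map (fun h => PySem.Str.len h + 1)) 1 := by
        rw [hwidths_def]; rfl
      rw [henum]
      exact pvZipN_map (fun (jw : Int × Int) (r : List String) => pvRjust (PySem.List.pyGetD r jw.1 "") jw.2) _ _ _
    have hrowB : ∀ r : List String, (h0 :: hs).length ≤ r.length →
        (PySem.List.enumerate widths).map (fun jw => pvRjust (PySem.List.pyGetD r jw.1 "") jw.2)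
          = List.zipWith (fun wd a => pvRJ a.toList wd.toNat) widths r := by
      intro r hr
      have h1 := pvEnumCells widths [] r (hwidlen ▸ hr)
      simp only [List.nil_append, List.length_nil, Nat.cast_zero] at h1
      rw [show PySem.List.enumerate widths = PySem.List.enumerate widths 0 from rfl, h1,
        show (fun (w : Int) (a : String) => pvRjust a w)
            = (fun (w : Int) (a : String) => pvRJ a.toList w.toNat) from
          funext fun w => funext fun a => pvRjust_eq a w]
    rw [hzip, PySem.List.foldl_append_eq_flatMap, pvJoin_nil]
    simp only [List.map_cons, List.flatten_cons, List.flatMap_def]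
    congr 1
    congr 1
    · rw [hrowA (h0 :: hs) le_rfl, pvJoin_nil, hrowB (h0 :: hs) le_rfl]
    · congr 1
      rw [List.map_map]
      apply List.map_congr_left
      intro r hr
      rw [hrowA r (hrows r hr)]
      simp only [Function.comp_def]
      rw [pvJoin_nil, hrowB r (hrows r hr)]

@[simp] theorem table_tostr_raises : Claim_raises_table_tostr := by
  unfold Claim_raises_table_tostr
  exact ⟨fun w rows headers _ hr hp => absurd hp.1 (not_le.mpr hr.1),
    by decide, by decide, by decide⟩
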